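-- pv_equiv track=rewrite | github.com/pypi-data/pypi-mirror-178 | packages/formgram/formgram-0.0.6-py3-none-any.whl/formgram/formgram_procedures/helper_functions/production_grouping.py | group_productions_by_producible_symbols
-- ===== SOURCE A (Python) =====
-- def group_productions_by_producible_symbols(productions: set) -> dict:
--     """This function creates a dictionary from productions by right hand symbols
--
--     The keys are symbols found in right hand sides of productions,
--     the values are sets of all productions including said symbol in right side
--
--     :examples:
--     >>> g_string = "<A> ::= 'b' <C> <D> | 'b'"
--     >>> grammar = parse(g_string)
--     >>> group_productions_by_producible_symbols(grammar["productions"])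
--      {"b": {(("A",), ("b", "C", "D")), (("A",),("b",))},
--       "C": {(("A",), ("b", "C", "D"))},
--       "D": {(("A",), ("b", "C", "D"))}}
--
--     :param productions: A set of productions
--     :return: a dictionary of productions grouped by symbols contained by them
--     """
--     structure = dict()
--     for production in productions:
--         _, right_hand_side = production
--         for symbol in right_hand_side:
--             if symbol in structure:
--                 structure[symbol].add(production)
--             else:
--                 structure[symbol] = {production}
--     return structure
-- ===== SOURCE B (Python) =====
-- def group_productions_by_producible_symbols(productions: set) -> dict:
--     """Gather the distinct right-hand-side symbols first (in first-seen order),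
--     then build each group by one scan over the productions per symbol."""
--     symbols = dict.fromkeys(s for p in productions for s in p[1])
--     return {sym: {p for p in productions if sym in p[1]} for sym in symbols}
-- ===== Notes on version B (the rewrite author's own statement) =====
-- stated objective: alternative
-- what changed: A builds the index in one pass, inserting each production into the set of every symbol of its RHS as it goes; B first collects the distinct RHS symbols and then builds each symbol's group by an independent scan of all productions (gather-keys-then-filter), a differently shaped traversal.
import Mathlib
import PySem

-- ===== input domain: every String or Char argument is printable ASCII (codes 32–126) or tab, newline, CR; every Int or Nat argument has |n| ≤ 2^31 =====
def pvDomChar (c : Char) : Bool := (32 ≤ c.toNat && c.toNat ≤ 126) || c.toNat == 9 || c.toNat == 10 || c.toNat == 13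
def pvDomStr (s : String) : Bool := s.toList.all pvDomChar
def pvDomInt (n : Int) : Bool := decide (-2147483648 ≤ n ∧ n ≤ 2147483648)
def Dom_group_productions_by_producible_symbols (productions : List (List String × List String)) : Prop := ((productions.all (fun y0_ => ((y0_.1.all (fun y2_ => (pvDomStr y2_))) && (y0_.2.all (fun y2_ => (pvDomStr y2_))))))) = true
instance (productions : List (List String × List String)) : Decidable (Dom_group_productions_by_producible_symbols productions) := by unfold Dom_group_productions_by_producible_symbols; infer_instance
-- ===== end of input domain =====

-- B gathers the distinct RHS symbols first and then builds each group by a separate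
-- scan over the productions, instead of A's single index-building insertion pass.

-- ===== PORT A =====
def group_productions_by_producible_symbols (productions : List (List String × List String)) : List (String × List (List String × List String)) :=
  (productions.foldl
    (fun structure_ production =>
      let right_hand_side := production.2
      right_hand_side.foldl
        (fun structure_ symbol =>
          if structure_.contains symbol then
            structure_.modify symbol [] (fun s => PySem.Set.add s production)
          else
            structure_.insert symbol (PySem.Set.add PySem.Set.empty production))
        structure_)
    PySem.Dict.empty).items

-- ===== PORT B =====
def group_productions_by_producible_symbols_alt (productions : List (List String × List String)) : List (String × List (List String × List String)) :=
  (PySem.List.dedup (productions.flatMap (fun p => p.2))).map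
    (fun sym => (sym, PySem.Set.ofList (productions.filter (fun p => p.2.contains sym))))

-- ===== PRECONDITION & SPEC =====
def Spec_group_productions_by_producible_symbols (productions : List (List String × List String)) (out : List (String × List (List String × List String))) : Prop := out = group_productions_by_producible_symbols_alt productions
instance (productions : List (List String × List String)) (out : List (String × List (List String × List String))) : Decidable (Spec_group_productions_by_producible_symbols productions out) := by unfold Spec_group_productions_by_producible_symbols; infer_instance

-- ===== CLAIM (what is proved, stated in full; the proofs are below) =====
def Claim_equal_group_productions_by_producible_symbols : Prop := ∀ (productions : List (List String × List String)), Dom_group_productions_by_producible_symbols productions → Spec_group_productions_by_producible_symbols productions (group_productions_by_producible_symbols productions)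

-- ===== LEMMAS AND PROOFS =====

-- abbreviations used only by the proofs
def pvStep (production : List String × List String)
    (d : PySem.Dict String (PySem.Set (List String × List String))) (symbol : String) :
    PySem.Dict String (PySem.Set (List String × List String)) :=
  if d.contains symbol then
    d.modify symbol [] (fun s => PySem.Set.add s production)
  else
    d.insert symbol (PySem.Set.add PySem.Set.empty production)

def pvOuter (d : PySem.Dict String (PySem.Set (List String × List String)))
    (production : List String × List String) :
    PySem.Dict String (PySem.Set (List String × List String)) :=
  production.2.foldl (pvStep production) d

theorem pv_getD_step (d : PySem.Dict String (PySem.Set (List String × List String)))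
    (p : List String × List String) (s sym : String) :
    (pvStep p d s).getD sym [] =
      if s = sym then PySem.Set.add (d.getD sym []) p else d.getD sym [] := by
  by_cases he : s = sym
  · subst he
    by_cases hc : d.contains s
    · simp [pvStep, hc, ]
    · simp [pvStep, hc, PySem.Dict.getD_of_not_contains _ _ (by simpa using hc),
        PySem.Set.add, PySem.Set.empty, PySem.Set.contains]
  · have he' : ¬ sym = s := fun h => he h.symm
    by_cases hc : d.contains s <;>
      simp [pvStep, hc, PySem.Dict.getD_modify, PySem.Dict.getD_insert, he, he']

theorem pv_getD_inner (p : List String × List String) (sym : String) :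
    ∀ (rhs : List String) (d : PySem.Dict String (PySem.Set (List String × List String))),
    (rhs.foldl (pvStep p) d).getD sym [] =
      if sym ∈ rhs then PySem.Set.add (d.getD sym []) p else d.getD sym [] := by
  intro rhs
  induction rhs with
  | nil => intro d; simp
  | cons s rhs ih =>
    intro d
    simp only [List.foldl_cons, ih, pv_getD_step, List.mem_cons]
    by_cases hs : s = sym
    · subst hs
      by_cases hr : s ∈ rhs <;> simp [hr]
    · have hs' : ¬ sym = s := fun h => hs h.symm
      simp [hs, hs']

theorem pv_getD_outer (sym : String) :
    ∀ (ps : List (List String × List String))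
      (d : PySem.Dict String (PySem.Set (List String × List String))),
    (ps.foldl pvOuter d).getD sym [] =
      PySem.Set.update (d.getD sym []) (ps.filter (fun p => decide (sym ∈ p.2))) := by
  intro ps
  induction ps with
  | nil => intro d; simp [PySem.Set.update]
  | cons p ps ih =>
    intro d
    simp only [List.foldl_cons, ih, List.filter_cons]
    by_cases hp : sym ∈ p.2
    · simp [hp, pvOuter, pv_getD_inner, PySem.Set.update]
    · simp [hp, pvOuter, pv_getD_inner]

theorem pv_keys_step (d : PySem.Dict String (PySem.Set (List String × List String)))
    (p : List String × List String) (s : String) :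
    (pvStep p d s).keys = PySem.Set.add d.keys s := by
  unfold pvStep
  by_cases hc : d.contains s
  · have hm : s ∈ d.keys := (PySem.Dict.contains_iff_mem_keys d s).1 hc
    rw [if_pos hc, PySem.Dict.keys_modify, PySem.Dict.keys_insert_of_contains _ _ hc]
    simp [PySem.Set.add, PySem.Set.contains, hm]
  · have hm : s ∉ d.keys := fun h => hc ((PySem.Dict.contains_iff_mem_keys d s).2 h)
    rw [if_neg hc, PySem.Dict.keys_insert_of_not_contains _ _ (by simpa using hc)]
    simp [PySem.Set.add, PySem.Set.contains, hm]

theorem pv_keys_inner (p : List String × List String) :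
    ∀ (rhs : List String) (d : PySem.Dict String (PySem.Set (List String × List String))),
    (rhs.foldl (pvStep p) d).keys = PySem.Set.update d.keys rhs := by
  intro rhs
  induction rhs with
  | nil => intro d; simp [PySem.Set.update]
  | cons s rhs ih => intro d; simp [ih, pv_keys_step, PySem.Set.update]

theorem pv_keys_outer :
    ∀ (ps : List (List String × List String))
      (d : PySem.Dict String (PySem.Set (List String × List String))),
    (ps.foldl pvOuter d).keys = PySem.Set.update d.keys (ps.flatMap (fun p => p.2)) := by
  intro ps
  induction ps with
  | nil => intro d; simp [PySem.Set.update]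
  | cons p ps ih =>
    intro d
    simp [ih, pvOuter, pv_keys_inner, PySem.Set.update, List.foldl_append]

-- ===== VERDICT (by name: the statement is the Claim_ definition above) =====
theorem group_productions_by_producible_symbols_spec : Claim_equal_group_productions_by_producible_symbols := by
  intro productions _
  show _ = _
  unfold group_productions_by_producible_symbols group_productions_by_producible_symbols_alt
  have hfold : (productions.foldl
      (fun structure_ production =>
        production.2.foldl
          (fun structure_ symbol =>
            if structure_.contains symbol then
              structure_.modify symbol [] (fun s => PySem.Set.add s production)
            else
              structure_.insert symbol (PySem.Set.add PySem.Set.empty production))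
          structure_)
      PySem.Dict.empty) = productions.foldl pvOuter PySem.Dict.empty := rfl
  rw [hfold]
  have hkeys : (productions.foldl pvOuter PySem.Dict.empty).keys =
      PySem.List.dedup (productions.flatMap (fun p => p.2)) := by
    rw [pv_keys_outer, PySem.List.dedup_eq_ofList]
    rfl
  have hnd : (productions.foldl pvOuter PySem.Dict.empty).keys.Nodup := by
    rw [hkeys, PySem.List.dedup_eq_ofList]
    exact PySem.Set.nodup_ofList _
  rw [PySem.Dict.items_eq_map_keys _ hnd ([] : PySem.Set (List String × List String)), hkeys]
  refine List.map_congr_left ?_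
  intro sym _
  rw [pv_getD_outer, PySem.Set.ofList_eq_foldl]
  simp [PySem.Set.update, PySem.Dict.getD_empty]
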